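-- pv_equiv track=rewrite | github.com/rtw-Git/CodingTestStudy | 기능개발.py | solution
-- ===== SOURCE A (Python) =====
-- def solution(progresses, speeds):
--     return_list = [0 for i in range(len(progresses))]
--     answer = []         #result_cnt
--     result_day = []
--     n = 1       #n일째
--     start = 0   #return_list의 인덱스, 연속을 확인하기 위함
--
--     while return_list != [1 for i in range(len(progresses))]:
--         new_progresses = [0 for i in range(len(progresses))]
--         for i in range(len(progresses)):
--             if new_progresses[i] != -1:
--                 new_progresses[i] = progresses[i] +speeds[i] * n
--
--         for j in range(len(new_progresses)):
--             if (new_progresses[j] >= 100):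
--                 return_list[j] = 1
--                 new_progresses[j] = -1
--
--         if (return_list[start] == 1):
--             cnt = 0
--             for k in range(start, len(return_list)):
--                 if (return_list[k] == 1):   #완성이 성립 시 +1(완성 기능)
--                     cnt += 1
--                 else:                       #미완성이면 반복문 나감
--                     break
--
--             result_day.append(n)
--             answer.append(cnt)
--             start = k                       #다음날에 이어서 완성이 되는지 확인하기 위함
--
--         n += 1
--
--     return answer
-- ===== SOURCE B (Python) =====
-- def solution(progresses, speeds):
--     # completion day of each feature: 1 if already done after one day's work, else ceil((100-p)/s)
--     days = [1 if p + s >= 100 else -((p - 100) // s) for p, s in zip(progresses, speeds)]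
--     answer = []
--     cur = 0
--     for d in days:
--         if answer and d <= cur:
--             answer[-1] += 1
--         else:
--             cur = d
--             answer.append(1)
--     return answer
-- ===== Notes on version B (the rewrite author's own statement) =====
-- stated objective: faster
-- what changed: B computes each feature's completion day in closed form with ceiling division and counts consecutive deployment groups in one pass, instead of A's day-by-day simulation that rebuilds and rescans whole lists every simulated day; intended as faster (O(n) vs O(n*maxday)) — a timing run saw A time out at n=16 where B returned, so no ratio could be measured.
import Mathlib
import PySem

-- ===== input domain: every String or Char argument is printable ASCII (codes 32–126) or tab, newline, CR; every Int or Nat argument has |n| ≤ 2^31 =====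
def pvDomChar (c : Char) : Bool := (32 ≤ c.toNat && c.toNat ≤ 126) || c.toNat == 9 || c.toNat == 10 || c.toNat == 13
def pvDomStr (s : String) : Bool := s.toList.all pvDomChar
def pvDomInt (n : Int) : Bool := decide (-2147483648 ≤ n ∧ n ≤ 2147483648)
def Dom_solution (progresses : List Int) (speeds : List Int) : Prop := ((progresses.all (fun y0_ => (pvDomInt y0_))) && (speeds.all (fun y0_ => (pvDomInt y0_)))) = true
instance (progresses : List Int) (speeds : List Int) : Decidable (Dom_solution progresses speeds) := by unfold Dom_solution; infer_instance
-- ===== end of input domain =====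

-- B computes each feature's completion day in closed form (ceiling division) and groups them in one
-- pass, instead of A's day-by-day simulation; intended as faster (a timing run saw A time out
-- where B returned, so no ratio could be measured).

-- ===== PORT A =====
-- completion day of feature (p, s): 1 if done after one day's work, else ceil((100-p)/s).
-- Used by solution_alt (B computes it), and by solution only to size the fuel of its while loop
-- (a totality guard; under Pre_ the loop always returns before the fuel runs out).
def pvDay (p s : Int) : Int := if 100 ≤ p + s then 1 else -(PySem.Int.floordiv (p - 100) s)

def pvDays (progresses : List Int) (speeds : List Int) : List Int :=
  (progresses.zip speeds).map (fun q => pvDay q.1 q.2)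

def fuelA (progresses : List Int) (speeds : List Int) : Nat :=
  ((pvDays progresses speeds).foldl max 1).toNat + 2

-- 'for k in range(start, len): if return_list[k]==1: cnt+=1 else: break' ; returns (cnt, k)
-- where k keeps Python's leaked loop-variable value (len-1 when the loop ran to the end).
def countLoopA (r : List Int) (len : Nat) (k : Nat) (cnt : Int) : Int × Nat :=
  if _h : k < len then
    if r.getD k 0 = 1 then countLoopA r len (k + 1) (cnt + 1) else (cnt, k)
  else (cnt, k - 1)
termination_by len - k

-- 'new_progresses = [0]*len' then 'for i in range(len): if new_progresses[i] != -1: new_progresses[i] = p[i]+s[i]*n'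
def passNew (progresses speeds : List Int) (n : Int) (len : Nat) : List Int :=
  (List.range len).foldl
    (fun np i => if np.getD i 0 ≠ -1 then np.set i (progresses.getD i 0 + speeds.getD i 0 * n) else np)
    (List.replicate len 0)

-- 'for j in range(len): if new_progresses[j] >= 100: return_list[j] = 1; new_progresses[j] = -1'
def passMark (r np : List Int) (len : Nat) : List Int × List Int :=
  (List.range len).foldl
    (fun (acc : List Int × List Int) j =>
      if 100 ≤ acc.2.getD j 0 then (acc.1.set j 1, acc.2.set j (-1)) else acc)
    (r, np)

-- the while loop of A; list indexing is via getD (exact: under Pre_ every index is in range).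
def loopA (progresses speeds : List Int) :
    Nat → List Int → List Int → List Int → Int → Nat → List Int
  | 0, _, answer, _, _, _ => answer
  | fuel + 1, r, answer, resultDay, n, start =>
    if r = List.replicate progresses.length 1 then answer
    else
      let len := progresses.length
      let rnp := passMark r (passNew progresses speeds n len) len
      if rnp.1.getD start 0 = 1 then
        let ck := countLoopA rnp.1 len start 0
        loopA progresses speeds fuel rnp.1 (answer ++ [ck.1]) (resultDay ++ [n]) (n + 1) ck.2
      else
        loopA progresses speeds fuel rnp.1 answer resultDay (n + 1) start

def solution (progresses : List Int) (speeds : List Int) : List Int :=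
  loopA progresses speeds (fuelA progresses speeds)
    (List.replicate progresses.length 0) [] [] 1 0

-- ===== PORT B =====
-- answer[-1] += 1
def incLastB : List Int → List Int
  | [] => []
  | [x] => [x + 1]
  | x :: xs => x :: incLastB xs

def stepB (acc : List Int × Int) (d : Int) : List Int × Int :=
  if acc.1 ≠ [] ∧ d ≤ acc.2 then (incLastB acc.1, acc.2) else (acc.1 ++ [1], d)

def solution_alt (progresses : List Int) (speeds : List Int) : List Int :=
  ((pvDays progresses speeds).foldl stepB ([], 0)).1

-- ===== PRECONDITION & SPEC =====
-- Pre_ excludes inputs where A raises IndexError (fewer speeds than progresses) and inputs where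
-- A's while loop never terminates (a feature with nonpositive speed that is not finished after
-- the first day); on every other input A returns.
def Pre_solution (progresses : List Int) (speeds : List Int) : Prop :=
  progresses.length ≤ speeds.length ∧
  ∀ q ∈ progresses.zip speeds, 1 ≤ q.2 ∨ 100 ≤ q.1 + q.2
instance (progresses : List Int) (speeds : List Int) : Decidable (Pre_solution progresses speeds) := by
  unfold Pre_solution; infer_instance
def pvWitness_solution : List Int × List Int := ([93, 30, 55], [1, 30, 5])

def Spec_solution (progresses : List Int) (speeds : List Int) (out : List Int) : Prop := out = solution_alt progresses speeds
instance (progresses : List Int) (speeds : List Int) (out : List Int) : Decidable (Spec_solution progresses speeds out) := by unfold Spec_solution; infer_instance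

-- ===== CLAIM (what is proved, stated in full; the proofs are below) =====
def Claim_equal_solution : Prop := ∀ (progresses : List Int) (speeds : List Int), Dom_solution progresses speeds → Pre_solution progresses speeds → Spec_solution progresses speeds (solution progresses speeds)

-- ===== LEMMAS AND PROOFS =====

-- ---------- B-side: the grouping fold ----------

-- proof-side name for B's fold
def gB (ds : List Int) : List Int := (ds.foldl stepB ([], 0)).1

lemma incLastB_cons (x : Int) (l : List Int) (h : l ≠ []) :
    incLastB (x :: l) = x :: incLastB l := by
  cases l with
  | nil => exact absurd rfl h
  | cons y t => rfl

lemma incLastB_ne_nil (l : List Int) (h : l ≠ []) : incLastB l ≠ [] := by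
  cases l with
  | nil => exact absurd rfl h
  | cons y t => cases t <;> simp [incLastB]

lemma incLastB_append (xs ys : List Int) (h : ys ≠ []) :
    incLastB (xs ++ ys) = xs ++ incLastB ys := by
  induction xs with
  | nil => rfl
  | cons x xs ih =>
    have hne : xs ++ ys ≠ [] := by simp [h]
    simp only [List.cons_append, incLastB_cons _ _ hne, ih]

lemma foldl_stepB_append (ds : List Int) : ∀ (xs ys : List Int) (cur : Int), ys ≠ [] →
    ds.foldl stepB (xs ++ ys, cur) =
      ((xs ++ (ds.foldl stepB (ys, cur)).1, (ds.foldl stepB (ys, cur)).2)) := by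
  induction ds with
  | nil => intro xs ys cur h; simp
  | cons d ds ih =>
    intro xs ys cur h
    simp only [List.foldl_cons]
    by_cases hc : d ≤ cur
    · have h1 : stepB (xs ++ ys, cur) d = (incLastB (xs ++ ys), cur) := by
        simp [stepB, hc, h]
      have h2 : stepB (ys, cur) d = (incLastB ys, cur) := by simp [stepB, hc, h]
      rw [h1, h2, incLastB_append _ _ h, ih _ _ _ (incLastB_ne_nil _ h)]
    · have h1 : stepB (xs ++ ys, cur) d = ((xs ++ ys) ++ [1], d) := by
        simp [stepB, hc]
      have h2 : stepB (ys, cur) d = (ys ++ [1], d) := by simp [stepB, hc]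
      rw [h1, h2, List.append_assoc, ih _ _ _ (by simp)]

lemma foldl_stepB_run (n : Int) : ∀ (u : List Int), (∀ x ∈ u, x ≤ n) →
    ∀ (c : Int) (v : List Int),
    (u ++ v).foldl stepB ([c], n) = v.foldl stepB ([c + u.length], n) := by
  intro u
  induction u with
  | nil => intro _ c v; simp
  | cons x u ih =>
    intro hu c v
    have hx : x ≤ n := hu x (by simp)
    have hstep : stepB ([c], n) x = ([c + 1], n) := by simp [stepB, hx, incLastB]
    simp only [List.cons_append, List.foldl_cons, hstep]
    rw [ih (fun y hy => hu y (by simp [hy])) (c + 1) v]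
    congr 2
    simp only [List.cons.injEq, List.length_cons, and_true]
    push_cast
    ring

lemma gB_cons (x : Int) (t : List Int) : gB (x :: t) = (t.foldl stepB ([1], x)).1 := by
  have : stepB ([], 0) x = ([1], x) := by simp [stepB]
  simp [gB, this]

lemma gB_group (n : Int) (u v : List Int) (hu : ∀ x ∈ u, x ≤ n) (hhead : u.head? = some n)
    (hv : ∀ h ∈ v.head?, n < h) :
    gB (u ++ v) = ((u.length : Int)) :: gB v := by
  cases u with
  | nil => simp at hhead
  | cons x u' =>
    obtain rfl : n = x := ((by simpa using hhead : x = n)).symm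
    rw [List.cons_append, gB_cons]
    rw [foldl_stepB_run n u' (fun y hy => hu y (by simp [hy])) 1 v]
    cases v with
    | nil =>
      simp [gB]
      ring
    | cons h t =>
      have hh : n < h := hv h (by simp)
      have hstep : stepB ([1 + (u'.length : Int)], n) h = ([1 + (u'.length : Int)] ++ [1], h) := by
        simp [stepB]; omega
      simp only [List.foldl_cons, hstep]
      rw [foldl_stepB_append t [1 + (u'.length : Int)] [1] h (by simp)]
      rw [gB_cons]
      simp
      ring

-- ---------- arithmetic: the completion day ----------

lemma pvDay_pos (p s : Int) (hq : 1 ≤ s ∨ 100 ≤ p + s) : 1 ≤ pvDay p s := by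
  unfold pvDay
  split_ifs with h
  · omega
  · have hs : 1 ≤ s := hq.resolve_right h
    have harg : p - 100 = -(100 - p) := by ring
    rw [harg]
    have hbr := (PySem.Int.neg_floordiv_neg_eq_iff_of_pos (a := 100 - p) (b := s)
      (q := -PySem.Int.floordiv (-(100 - p)) s) (by omega)).mp rfl
    nlinarith [hbr.1, hbr.2]

lemma mark_iff (p s n : Int) (hq : 1 ≤ s ∨ 100 ≤ p + s) (hn : 1 ≤ n) :
    (100 ≤ p + s * n ∨ pvDay p s ≤ n - 1) ↔ pvDay p s ≤ n := by
  unfold pvDay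
  split_ifs with h
  · constructor
    · intro _; omega
    · intro _
      rcases Int.lt_or_le n 2 with h2 | h2
      · left; have : n = 1 := by omega
        subst this; linarith
      · right; omega
  · have hs : 1 ≤ s := hq.resolve_right h
    have harg : p - 100 = -(100 - p) := by ring
    rw [harg]
    set c := -PySem.Int.floordiv (-(100 - p)) s with hc
    have hbr := (PySem.Int.neg_floordiv_neg_eq_iff_of_pos (a := 100 - p) (b := s)
      (q := c) (by omega)).mp rfl
    constructor
    · rintro (h100 | hle)
      · -- 100 - p ≤ s * n, and (c-1)*s < 100-p, so c - 1 < n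
        nlinarith [hbr.1]
      · omega
    · intro hcn
      left
      nlinarith [hbr.2]

-- ---------- A-side: the two inner for-loops ----------

lemma passNew_aux (p s : List Int) (n : Int) : ∀ (k a : Nat) (v : List Int),
    (∀ j, a ≤ j → v.getD j 0 = 0) →
    ((List.range' a k).foldl
      (fun np i => if np.getD i 0 ≠ -1 then np.set i (p.getD i 0 + s.getD i 0 * n) else np)
      v).length = v.length ∧
    (∀ j, j < a ∨ a + k ≤ j →
      ((List.range' a k).foldl
        (fun np i => if np.getD i 0 ≠ -1 then np.set i (p.getD i 0 + s.getD i 0 * n) else np)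
        v).getD j 0 = v.getD j 0) ∧
    (∀ j, a ≤ j → j < a + k → j < v.length →
      ((List.range' a k).foldl
        (fun np i => if np.getD i 0 ≠ -1 then np.set i (p.getD i 0 + s.getD i 0 * n) else np)
        v).getD j 0 = p.getD j 0 + s.getD j 0 * n) := by
  intro k
  induction k with
  | zero => intro a v hv; exact ⟨rfl, fun j _ => rfl, fun j h1 h2 _ => by omega⟩
  | succ k ih =>
    intro a v hv
    rw [List.range'_succ, List.foldl_cons]
    have hg : v.getD a 0 = 0 := hv a (le_refl a)
    have hguard : (if v.getD a 0 ≠ -1 then v.set a (p.getD a 0 + s.getD a 0 * n) else v)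
        = v.set a (p.getD a 0 + s.getD a 0 * n) := by rw [hg]; simp
    rw [hguard]
    set v' := v.set a (p.getD a 0 + s.getD a 0 * n) with hv'
    have hlen' : v'.length = v.length := List.length_set ..
    have hvs : ∀ j, a + 1 ≤ j → v'.getD j 0 = 0 := by
      intro j hj
      rw [hv', List.getD_eq_getElem?_getD, List.getElem?_set_ne (by omega),
        ← List.getD_eq_getElem?_getD]
      exact hv j (by omega)
    obtain ⟨ih1, ih2, ih3⟩ := ih (a + 1) v' hvs
    refine ⟨by rw [ih1, hlen'], ?_, ?_⟩
    · intro j hj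
      have hj' : j < a + 1 ∨ a + 1 + k ≤ j := by omega
      rw [ih2 j hj']
      have hja : j ≠ a := by omega
      rw [hv', List.getD_eq_getElem?_getD, List.getElem?_set_ne (by omega),
        ← List.getD_eq_getElem?_getD]
    · intro j hj1 hj2 hj3
      rcases Nat.eq_or_lt_of_le hj1 with hja | hja
      · subst hja
        rw [ih2 a (Or.inl (by omega)), hv', List.getD_eq_getElem?_getD,
          List.getElem?_set_self hj3]
        rfl
      · exact ih3 j (by omega) (by omega) (by rw [hlen']; exact hj3)

lemma passMark_aux : ∀ (k a : Nat) (r v : List Int), a + k ≤ r.length →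
    (((List.range' a k).foldl
      (fun (acc : List Int × List Int) j =>
        if 100 ≤ acc.2.getD j 0 then (acc.1.set j 1, acc.2.set j (-1)) else acc)
      (r, v)).1.length = r.length) ∧
    (∀ j, ((List.range' a k).foldl
      (fun (acc : List Int × List Int) j =>
        if 100 ≤ acc.2.getD j 0 then (acc.1.set j 1, acc.2.set j (-1)) else acc)
      (r, v)).1.getD j 0 = if a ≤ j ∧ j < a + k ∧ 100 ≤ v.getD j 0 then 1 else r.getD j 0) := by
  intro k
  induction k with
  | zero =>
    intro a r v _
    refine ⟨rfl, fun j => ?_⟩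
    rw [if_neg (by omega)]
    rfl
  | succ k ih =>
    intro a r v hlen
    rw [List.range'_succ, List.foldl_cons]
    by_cases hc : 100 ≤ v.getD a 0
    · rw [if_pos hc]
      obtain ⟨ih1, ih2⟩ := ih (a + 1) (r.set a 1) (v.set a (-1))
        (by rw [List.length_set]; omega)
      refine ⟨by rw [ih1, List.length_set], fun j => ?_⟩
      rw [ih2 j]
      by_cases hja : j = a
      · subst hja
        rw [if_neg (by omega), if_pos ⟨by omega, by omega, hc⟩,
          List.getD_eq_getElem?_getD, List.getElem?_set_self (by omega)]
        rfl
      · have hvj : (v.set a (-1)).getD j 0 = v.getD j 0 := by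
          rw [List.getD_eq_getElem?_getD, List.getElem?_set_ne (by omega),
            ← List.getD_eq_getElem?_getD]
        have hrj : (r.set a 1).getD j 0 = r.getD j 0 := by
          rw [List.getD_eq_getElem?_getD, List.getElem?_set_ne (by omega),
            ← List.getD_eq_getElem?_getD]
        rw [hvj, hrj]
        by_cases h1 : a + 1 ≤ j ∧ j < a + 1 + k ∧ 100 ≤ v.getD j 0
        · rw [if_pos h1, if_pos ⟨by omega, by omega, h1.2.2⟩]
        · rw [if_neg h1, if_neg (by
            intro h2
            exact h1 ⟨by omega, by omega, h2.2.2⟩)]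
    · rw [if_neg hc]
      obtain ⟨ih1, ih2⟩ := ih (a + 1) r v (by omega)
      refine ⟨ih1, fun j => ?_⟩
      rw [ih2 j]
      by_cases h1 : a + 1 ≤ j ∧ j < a + 1 + k ∧ 100 ≤ v.getD j 0
      · rw [if_pos h1, if_pos ⟨by omega, by omega, h1.2.2⟩]
      · rw [if_neg h1]
        by_cases hja : j = a
        · subst hja
          rw [if_neg (by intro h2; exact hc h2.2.2)]
        · rw [if_neg (by intro h2; exact h1 ⟨by omega, by omega, h2.2.2⟩)]

-- ---------- the days list and the return_list invariant ----------

lemma pvDays_length (p s : List Int) (hl : p.length ≤ s.length) :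
    (pvDays p s).length = p.length := by
  simp [pvDays]
  omega

lemma pvDays_getD (p s : List Int) (j : Nat) (hj : j < p.length) (hl : p.length ≤ s.length) :
    (pvDays p s).getD j 0 = pvDay (p.getD j 0) (s.getD j 0) := by
  have hjd : j < (pvDays p s).length := by rw [pvDays_length p s hl]; exact hj
  have hjz : j < (p.zip s).length := by simp; omega
  rw [List.getD_eq_getElem _ _ hjd, List.getD_eq_getElem _ _ hj,
    List.getD_eq_getElem _ _ (show j < s.length by omega)]
  simp [pvDays, List.getElem_zip]

lemma pre_at (p s : List Int) (hPre : Pre_solution p s) (j : Nat) (hj : j < p.length) :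
    1 ≤ s.getD j 0 ∨ 100 ≤ p.getD j 0 + s.getD j 0 := by
  have hl : p.length ≤ s.length := hPre.1
  have hjz : j < (p.zip s).length := by simp; omega
  have hmem : (p[j]'hj, s[j]'(by omega)) ∈ p.zip s := by
    rw [show (p[j]'hj, s[j]'(by omega)) = (p.zip s)[j]'hjz from (List.getElem_zip).symm]
    exact List.getElem_mem hjz
  have := hPre.2 _ hmem
  rw [List.getD_eq_getElem _ _ hj, List.getD_eq_getElem _ _ (show j < s.length by omega)]
  exact this

lemma pvDays_getD_pos (p s : List Int) (hPre : Pre_solution p s) (j : Nat) (hj : j < p.length) :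
    1 ≤ (pvDays p s).getD j 0 := by
  rw [pvDays_getD p s j hj hPre.1]
  exact pvDay_pos _ _ (pre_at p s hPre j hj)

-- invariant of A's return_list: after the day-m marking pass, entry j is 1 iff feature j's day ≤ m
def Rinv (p s : List Int) (m : Int) (r : List Int) : Prop :=
  r.length = p.length ∧
  ∀ j < p.length, r.getD j 0 = if (pvDays p s).getD j 0 ≤ m then 1 else 0

lemma markStep (p s : List Int) (hPre : Pre_solution p s) (n : Int) (hn : 1 ≤ n)
    (r : List Int) (hr : Rinv p s (n - 1) r) :
    Rinv p s n (passMark r (passNew p s n p.length) p.length).1 := by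
  unfold passMark passNew
  rw [List.range_eq_range']
  have hrep : ∀ j, 0 ≤ j → (List.replicate p.length (0 : Int)).getD j 0 = 0 := by
    intro j _
    rcases Nat.lt_or_ge j p.length with h | h
    · rw [List.getD_eq_getElem _ _ (by simpa using h)]; simp
    · rw [List.getD_eq_getElem?_getD, List.getElem?_eq_none (by simpa using h)]; rfl
  obtain ⟨hnp1, _, hnp3⟩ := passNew_aux p s n p.length 0 (List.replicate p.length 0) hrep
  obtain ⟨hm1, hm2⟩ := passMark_aux p.length 0 r
    ((List.range' 0 p.length).foldl
      (fun np i => if np.getD i 0 ≠ -1 then np.set i (p.getD i 0 + s.getD i 0 * n) else np)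
      (List.replicate p.length 0)) (by rw [hr.1]; omega)
  constructor
  · rw [hm1, hr.1]
  · intro j hj
    rw [hm2 j]
    have hnpj : ((List.range' 0 p.length).foldl
        (fun np i => if np.getD i 0 ≠ -1 then np.set i (p.getD i 0 + s.getD i 0 * n) else np)
        (List.replicate p.length 0)).getD j 0 = p.getD j 0 + s.getD j 0 * n :=
      hnp3 j (by omega) (by omega) (by simpa using hj)
    rw [hnpj, hr.2 j hj, pvDays_getD p s j hj hPre.1]
    have hiff := mark_iff (p.getD j 0) (s.getD j 0) n (pre_at p s hPre j hj) hn
    by_cases hle : pvDay (p.getD j 0) (s.getD j 0) ≤ n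
    · rw [if_pos hle]
      rcases hiff.mpr hle with h100 | hm
      · rw [if_pos ⟨by omega, by omega, h100⟩]
      · rw [if_pos hm]
        split <;> rfl
    · have h100 : ¬ 100 ≤ p.getD j 0 + s.getD j 0 * n := fun hc => hle (hiff.mp (Or.inl hc))
      have hm : ¬ pvDay (p.getD j 0) (s.getD j 0) ≤ n - 1 := fun hc => hle (hiff.mp (Or.inr hc))
      rw [if_neg hle, if_neg (fun hc => h100 hc.2.2), if_neg hm]

lemma replicate_check (p s : List Int) (m : Int) (r : List Int) (hr : Rinv p s m r) :
    r = List.replicate p.length 1 ↔ ∀ j < p.length, (pvDays p s).getD j 0 ≤ m := by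
  rw [List.eq_replicate_iff]
  constructor
  · rintro ⟨_, hall⟩ j hj
    have hjr : j < r.length := by rw [hr.1]; exact hj
    have h1 : r.getD j 0 = 1 := by
      rw [List.getD_eq_getElem _ _ hjr]
      exact hall _ (List.getElem_mem hjr)
    have := hr.2 j hj
    rw [h1] at this
    by_contra hc
    rw [if_neg hc] at this
    exact absurd this (by norm_num)
  · intro hall
    refine ⟨hr.1, fun b hb => ?_⟩
    obtain ⟨j, hj, rfl⟩ := List.mem_iff_getElem.mp hb
    have hjp : j < p.length := by rw [← hr.1]; exact hj
    rw [← List.getD_eq_getElem _ 0 hj, hr.2 j hjp, if_pos (hall j hjp)]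

-- the first element after the takeWhile prefix fails the predicate
lemma takeWhile_boundary (pred : Int → Bool) (l : List Int) (d : Int)
    (h : (l.takeWhile pred).length < l.length) :
    pred (l.getD (l.takeWhile pred).length d) = false := by
  induction l with
  | nil => simp at h
  | cons x t ih =>
    by_cases hp : pred x
    · have h' : (List.takeWhile pred t).length < t.length := by
        have := h
        rw [List.takeWhile_cons_of_pos hp] at this
        simpa using this
      rw [List.takeWhile_cons_of_pos hp]
      simpa [List.getD_cons_succ] using ih h'
    · rw [List.takeWhile_cons_of_neg (by simpa using hp)]
      simpa [List.getD_cons_zero] using hp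

lemma countLoopA_spec (r d : List Int) (len : Nat) (n : Int)
    (hr : ∀ j < len, r.getD j 0 = if d.getD j 0 ≤ n then 1 else 0)
    (hd : d.length = len) :
    ∀ (m k : Nat) (cnt : Int), len - k = m → k ≤ len →
    countLoopA r len k cnt =
      (cnt + ((d.drop k).takeWhile (fun x => decide (x ≤ n))).length,
       if k + ((d.drop k).takeWhile (fun x => decide (x ≤ n))).length < len
         then k + ((d.drop k).takeWhile (fun x => decide (x ≤ n))).length else len - 1) := by
  intro m
  induction m with
  | zero =>
    intro k cnt hm hk
    have hkl : k = len := by omega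
    subst hkl
    rw [countLoopA]
    rw [dif_neg (by omega)]
    rw [show d.drop k = [] from List.drop_of_length_le (by omega)]
    simp
  | succ m ih =>
    intro k cnt hm hk
    have hklt : k < len := by omega
    have hkd : k < d.length := by omega
    rw [countLoopA, dif_pos hklt]
    rw [List.drop_eq_getElem_cons hkd]
    have hgd : d.getD k 0 = d[k]'hkd := List.getD_eq_getElem _ _ hkd
    by_cases hdk : d[k]'hkd ≤ n
    · have hr1 : r.getD k 0 = 1 := by rw [hr k hklt, hgd, if_pos hdk]
      rw [if_pos hr1, List.takeWhile_cons_of_pos (by simpa using hdk)]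
      rw [ih (k + 1) (cnt + 1) (by omega) (by omega)]
      simp only [List.length_cons]
      congr 1
      · push_cast
        ring
      · generalize (List.takeWhile (fun x => decide (x ≤ n)) (List.drop (k + 1) d)).length = L
        rw [show k + 1 + L = k + (L + 1) from by omega]
    · have hr0 : r.getD k 0 = 0 := by rw [hr k hklt, hgd, if_neg hdk]
      rw [if_neg (by rw [hr0]; norm_num), List.takeWhile_cons_of_neg (by simpa using hdk)]
      simp [hklt]

-- ---------- the main loop: A's simulation produces B's grouping ----------

lemma loopA_eq (p s : List Int) (hPre : Pre_solution p s) :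
    ∀ (fuel : Nat) (r answer resultDay : List Int) (n : Int) (start : Nat),
    Rinv p s (n - 1) r → 1 ≤ n → start < p.length →
    n ≤ (pvDays p s).getD start 0 →
    (∀ j < start, (pvDays p s).getD j 0 ≤ n - 1) →
    (pvDays p s).foldl max 1 + 2 ≤ n + fuel →
    loopA p s fuel r answer resultDay n start = answer ++ gB ((pvDays p s).drop start) := by
  have hdlen : (pvDays p s).length = p.length := pvDays_length p s hPre.1
  intro fuel
  induction fuel with
  | zero =>
    intro r answer resultDay n start _ _ hstart hds _ hfuel
    exfalso
    have hmem : (pvDays p s).getD start 0 ∈ pvDays p s := by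
      rw [List.getD_eq_getElem _ _ (by omega)]
      exact List.getElem_mem _
    have hmax := (PySem.List.le_foldl_max (pvDays p s) 1).2 _ hmem
    omega
  | succ fuel ih =>
    intro r answer resultDay n start hr hn hstart hds hprev hfuel
    have hmem : (pvDays p s).getD start 0 ∈ pvDays p s := by
      rw [List.getD_eq_getElem _ _ (by omega)]
      exact List.getElem_mem _
    have hmax := (PySem.List.le_foldl_max (pvDays p s) 1).2 _ hmem
    simp only [loopA]
    rw [if_neg (by
      intro hrep
      have := (replicate_check p s (n - 1) r hr).mp hrep start hstart
      omega)]
    have hr2 : Rinv p s n (passMark r (passNew p s n p.length) p.length).1 :=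
      markStep p s hPre n hn r hr
    set r2 := (passMark r (passNew p s n p.length) p.length).1 with hr2def
    have hr2start : r2.getD start 0 = if (pvDays p s).getD start 0 ≤ n then 1 else 0 :=
      hr2.2 start hstart
    by_cases hds2 : (pvDays p s).getD start 0 ≤ n
    · -- the group headed by `start` is deployed today (day n is its completion day)
      have hdsn : (pvDays p s).getD start 0 = n := le_antisymm hds2 hds
      rw [if_pos (by rw [hr2start, if_pos hds2])]
      have hcnt := countLoopA_spec r2 (pvDays p s) p.length n
        (fun j hj => hr2.2 j hj) hdlen (p.length - start) start 0 rfl (by omega)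
      set u := ((pvDays p s).drop start).takeWhile (fun x => decide (x ≤ n)) with hu
      have hstartd : start < (pvDays p s).length := by omega
      have hhead : u.head? = some n := by
        rw [hu, List.drop_eq_getElem_cons hstartd,
          List.takeWhile_cons_of_pos (by
            simp only [decide_eq_true_eq]
            rw [← List.getD_eq_getElem _ 0 hstartd]
            exact hds2)]
        rw [List.head?_cons, ← List.getD_eq_getElem _ 0 hstartd, hdsn]
      have humem : ∀ x ∈ u, x ≤ n := fun x hx => by
        simpa using List.mem_takeWhile_imp hx
      have hule : u.length ≤ p.length - start := by
        have h1 : u.length ≤ ((pvDays p s).drop start).length :=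
          (List.takeWhile_prefix _).length_le
        rw [List.length_drop, hdlen] at h1
        exact h1
      rw [hcnt]
      by_cases hfits : start + u.length < p.length
      · -- the run of completed features stops before the end of the list
        have hw : u ++ ((pvDays p s).drop start).dropWhile (fun x => decide (x ≤ n))
            = (pvDays p s).drop start := List.takeWhile_append_dropWhile
        have hdw : ((pvDays p s).drop start).drop u.length
            = ((pvDays p s).drop start).dropWhile (fun x => decide (x ≤ n)) := by
          conv_lhs => rw [← hw]
          exact List.drop_left
        have hsplit : (pvDays p s).drop start = u ++ (pvDays p s).drop (start + u.length) := by
          rw [← List.drop_drop, hdw, hw]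
        have hvhead : ∀ x ∈ ((pvDays p s).drop (start + u.length)).head?, n < x := by
          intro x hx
          rw [List.head?_drop] at hx
          have hklt : start + u.length < (pvDays p s).length := by omega
          rw [List.getElem?_eq_getElem hklt] at hx
          obtain rfl : (pvDays p s)[start + u.length]'hklt = x := by simpa using hx
          have hb := takeWhile_boundary (fun x => decide (x ≤ n)) ((pvDays p s).drop start) 0
            (by rw [List.length_drop, ← hu]; omega)
          rw [← hu, List.getD_eq_getElem _ 0 (by rw [List.length_drop]; omega),
            List.getElem_drop] at hb
          exact not_le.mp (by simpa using hb)
        have hnext : n < (pvDays p s).getD (start + u.length) 0 := by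
          have hklt : start + u.length < (pvDays p s).length := by omega
          have := hvhead ((pvDays p s)[start + u.length]'hklt)
            (by rw [List.head?_drop, List.getElem?_eq_getElem hklt]; rfl)
          rw [List.getD_eq_getElem _ 0 hklt]
          exact this
        have hprev' : ∀ j < start + u.length, (pvDays p s).getD j 0 ≤ n + 1 - 1 := by
          intro j hj
          rcases Nat.lt_or_ge j start with hjs | hjs
          · have := hprev j hjs; omega
          · have hjd : j < (pvDays p s).length := by omega
            have hju : j - start < u.length := by omega
            have hjdrop : j - start < ((pvDays p s).drop start).length := by
              rw [List.length_drop]; omega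
            have hgu : u[j - start]'hju = ((pvDays p s).drop start)[j - start]'hjdrop :=
              List.IsPrefix.getElem (List.takeWhile_prefix _) hju
            have hle := humem _ (List.getElem_mem hju)
            have hgj : ((pvDays p s).drop start)[j - start]'hjdrop
                = (pvDays p s)[j]'(by omega) := by
              rw [List.getElem_drop]
              exact getElem_congr rfl (by omega) (by omega)
            rw [hgu, hgj] at hle
            rw [List.getD_eq_getElem _ 0 hjd]
            omega
        rw [if_pos hfits]
        rw [ih r2 (answer ++ [0 + (u.length : Int)]) (resultDay ++ [n]) (n + 1)
          (start + u.length)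
          (by rw [show (n : Int) + 1 - 1 = n from by ring]; exact hr2)
          (by omega) hfits (by omega) hprev' (by push_cast at hfuel ⊢; omega)]
        rw [hsplit, gB_group n u _ humem hhead hvhead]
        rw [List.append_assoc]
        simp
      · -- the whole rest of the list is completed: next day the while loop exits
        have hulen2 : u.length = p.length - start := by omega
        have huall : u = (pvDays p s).drop start := by
          apply List.IsPrefix.eq_of_length (List.takeWhile_prefix _)
          rw [hulen2, List.length_drop, hdlen]
        rw [if_neg hfits]
        obtain ⟨f, rfl⟩ : ∃ f, fuel = f + 1 := ⟨fuel - 1, by omega⟩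
        simp only [loopA]
        rw [if_pos ((replicate_check p s n r2 hr2).mpr (by
          intro j hj
          rcases Nat.lt_or_ge j start with hjs | hjs
          · have := hprev j hjs; omega
          · have hjd : j < (pvDays p s).length := by omega
            have hjdrop : j - start < ((pvDays p s).drop start).length := by
              rw [List.length_drop]; omega
            have hmem2 : ((pvDays p s).drop start)[j - start]'hjdrop ∈ u := by
              rw [huall]
              exact List.getElem_mem hjdrop
            have hle := humem _ hmem2
            have hgj : ((pvDays p s).drop start)[j - start]'hjdrop
                = (pvDays p s)[j]'(by omega) := by
              rw [List.getElem_drop]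
              exact getElem_congr rfl (by omega) (by omega)
            rw [hgj] at hle
            rw [List.getD_eq_getElem _ 0 hjd]
            exact hle))]
        have hgBu : gB u = [(u.length : Int)] := by
          have hg := gB_group n u [] humem hhead (by simp)
          rw [List.append_nil] at hg
          simpa [gB] using hg
        rw [← huall, hgBu]
        simp
    · -- nothing new at index `start` today: carry on to day n+1
      rw [if_neg (by rw [hr2start, if_neg hds2]; norm_num)]
      exact ih r2 answer resultDay (n + 1) start
        (by rw [show (n : Int) + 1 - 1 = n from by ring]; exact hr2)
        (by omega) hstart (by omega)
        (fun j hj => by have := hprev j hj; omega) (by push_cast at hfuel ⊢; omega)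

-- ===== VERDICT (by name: the statement is the Claim_ definition above) =====
theorem solution_spec : Claim_equal_solution := by
  unfold Claim_equal_solution
  intro p s _ hPre
  show solution p s = solution_alt p s
  by_cases h0 : p = []
  · subst h0
    simp [solution, solution_alt, pvDays, fuelA, loopA]
  · have hstart : 0 < p.length := List.length_pos_of_ne_nil h0
    have happly := loopA_eq p s hPre (fuelA p s) (List.replicate p.length 0) [] [] 1 0
      ⟨by simp, fun j hj => by
        rw [List.getD_eq_getElem _ _ (by simpa using hj), List.getElem_replicate,
          if_neg (by have := pvDays_getD_pos p s hPre j hj; omega)]⟩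
      (le_refl 1) hstart
      (pvDays_getD_pos p s hPre 0 hstart)
      (fun j hj => absurd hj (Nat.not_lt_zero j))
      (by
        unfold fuelA
        push_cast
        have := Int.self_le_toNat ((pvDays p s).foldl max 1)
        omega)
    rw [solution, happly]
    simp [gB, solution_alt]
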